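-- pv_equiv track=rewrite | github.com/codingyesiamalway/gene_indentification_hmm_trigram | unigram_tags.py | addRARE_to_TagToWordToCount
-- ===== SOURCE A (Python) =====
-- _RARE_ = '_RARE_'
--
-- def addRARE_to_TagToWordToCount(tagToWordToCount, minWordCount):
--     res = {}
--     for tag in tagToWordToCount:
--         if tag not in res:
--             res[tag] = {}
--         for word in tagToWordToCount[tag]:
--             count = tagToWordToCount[tag][word]
--             if count < minWordCount:
--                 word = _RARE_
--             if word not in res[tag]:
--                 res[tag][word] = count
--             else:
--                 res[tag][word] += count
--     return res
-- ===== SOURCE B (Python) =====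
-- _RARE_ = '_RARE_'
--
-- def addRARE_to_TagToWordToCount(tagToWordToCount, minWordCount):
--     res = {}
--     for tag, words in tagToWordToCount.items():
--         mapped = [(_RARE_ if c < minWordCount else w, c) for w, c in words.items()]
--         keys = list(dict.fromkeys(k for k, _ in mapped))
--         res[tag] = {k: sum(c for k2, c in mapped if k2 == k) for k in keys}
--     return res
-- ===== Notes on version B (the rewrite author's own statement) =====
-- stated objective: simpler
-- what changed: Replaces A's interleaved mutate-as-you-go dict merge (membership test plus insert-or-increment per word) with a per-tag map/group-by: rename rare words to _RARE_ in one comprehension, take the first-occurrence-ordered distinct keys, and build each tag's dict as a per-key sum.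
import Mathlib
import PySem

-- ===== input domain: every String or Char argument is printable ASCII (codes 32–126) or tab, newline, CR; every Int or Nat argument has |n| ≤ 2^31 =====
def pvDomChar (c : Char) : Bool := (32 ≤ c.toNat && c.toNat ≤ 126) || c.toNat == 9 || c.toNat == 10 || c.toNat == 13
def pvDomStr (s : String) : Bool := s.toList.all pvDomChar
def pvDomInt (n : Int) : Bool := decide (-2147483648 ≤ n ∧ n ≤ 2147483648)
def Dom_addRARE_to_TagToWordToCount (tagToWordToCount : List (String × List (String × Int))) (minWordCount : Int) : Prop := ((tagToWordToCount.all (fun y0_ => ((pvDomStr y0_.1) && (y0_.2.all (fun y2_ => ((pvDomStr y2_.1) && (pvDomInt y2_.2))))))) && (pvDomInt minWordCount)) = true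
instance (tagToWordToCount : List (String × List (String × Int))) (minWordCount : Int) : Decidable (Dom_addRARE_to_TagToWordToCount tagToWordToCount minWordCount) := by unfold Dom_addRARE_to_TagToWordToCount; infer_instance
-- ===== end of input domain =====

-- B builds each tag's dict by a map / ordered-dedup / per-key-sum group-by instead of A's
-- interleaved insert-or-increment merge; objective: simpler decomposition, same results.


-- ===== PORT A =====
-- one word of A's inner loop: rename rare words to '_RARE_', then insert-or-increment (literal branch)
def pvAStep (minWordCount : Int) (cur : PySem.Dict String Int) (q : String × Int) : PySem.Dict String Int :=
  let word := if q.2 < minWordCount then "_RARE_" else q.1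
  match cur.get? word with
  | none => cur.insert word q.2
  | some v => cur.insert word (v + q.2)

def addRARE_to_TagToWordToCount (tagToWordToCount : List (String × List (String × Int))) (minWordCount : Int) : List (String × List (String × Int)) :=
  (tagToWordToCount.foldl
    (fun res p =>
      let res1 := if res.contains p.1 then res else res.insert p.1 PySem.Dict.empty
      p.2.foldl (fun r q => r.insert p.1 (pvAStep minWordCount (r.getD p.1 PySem.Dict.empty) q)) res1)
    PySem.Dict.empty).items.map (fun p => (p.1, p.2.items))

-- ===== PORT B =====
def addRARE_to_TagToWordToCount_alt (tagToWordToCount : List (String × List (String × Int))) (minWordCount : Int) : List (String × List (String × Int)) :=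
  tagToWordToCount.map (fun p =>
    let mapped := p.2.map (fun q => ((if q.2 < minWordCount then "_RARE_" else q.1), q.2))
    let keys := PySem.List.dedup (mapped.map (fun q => q.1))
    (p.1, keys.map (fun k => (k, ((mapped.filter (fun q => q.1 == k)).map (fun q => q.2)).sum))))

-- ===== PRECONDITION & SPEC =====
-- A Python dict cannot contain duplicate keys, so association lists with a repeated tag represent
-- no Python input; Pre_ excludes exactly those (it excludes no input a Python caller can pass).
def Pre_addRARE_to_TagToWordToCount (tagToWordToCount : List (String × List (String × Int))) (minWordCount : Int) : Prop :=
  (tagToWordToCount.map Prod.fst).Nodup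
instance (tagToWordToCount : List (String × List (String × Int))) (minWordCount : Int) : Decidable (Pre_addRARE_to_TagToWordToCount tagToWordToCount minWordCount) := by unfold Pre_addRARE_to_TagToWordToCount; infer_instance

def pvWitness_addRARE_to_TagToWordToCount : (List (String × List (String × Int))) × Int :=
  ([("GENE", [("atg", 3), ("ccc", 1)]), ("O", [])], 2)

def Spec_addRARE_to_TagToWordToCount (tagToWordToCount : List (String × List (String × Int))) (minWordCount : Int) (out : List (String × List (String × Int))) : Prop := out = addRARE_to_TagToWordToCount_alt tagToWordToCount minWordCount
instance (tagToWordToCount : List (String × List (String × Int))) (minWordCount : Int) (out : List (String × List (String × Int))) : Decidable (Spec_addRARE_to_TagToWordToCount tagToWordToCount minWordCount out) := by unfold Spec_addRARE_to_TagToWordToCount; infer_instance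

-- ===== CLAIM (what is proved, stated in full; the proofs are below) =====
def Claim_equal_addRARE_to_TagToWordToCount : Prop := ∀ (tagToWordToCount : List (String × List (String × Int))) (minWordCount : Int), Dom_addRARE_to_TagToWordToCount tagToWordToCount minWordCount → Pre_addRARE_to_TagToWordToCount tagToWordToCount minWordCount → Spec_addRARE_to_TagToWordToCount tagToWordToCount minWordCount (addRARE_to_TagToWordToCount tagToWordToCount minWordCount)

-- ===== LEMMAS AND PROOFS =====

-- the renamed key of one (word, count) pair
def pvKey (m : Int) (q : String × Int) : String := if q.2 < m then "_RARE_" else q.1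

theorem pvAStep_eq (m : Int) (d : PySem.Dict String Int) (q : String × Int) :
    pvAStep m d q = d.insert (pvKey m q) (d.getD (pvKey m q) 0 + q.2) := by
  simp only [pvAStep, pvKey]
  cases h : d.get? (if q.2 < m then "_RARE_" else q.1) with
  | none => simp [PySem.Dict.getD_eq_get?_getD, h]
  | some v => simp [PySem.Dict.getD_eq_get?_getD, h]

theorem pvAStep_funext (m : Int) :
    pvAStep m = fun d q => d.insert (pvKey m q) (d.getD (pvKey m q) 0 + q.2) :=
  funext fun d => funext fun q => pvAStep_eq m d q

-- hoisting A's inner loop: repeatedly rewriting res[tag] equals one write of the folded inner dict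
theorem pv_inner_hoist (m : Int) (l : List (String × Int))
    (res : PySem.Dict String (PySem.Dict String Int)) (tag : String) (d : PySem.Dict String Int) :
    l.foldl (fun r q => r.insert tag (pvAStep m (r.getD tag PySem.Dict.empty) q)) (res.insert tag d)
      = res.insert tag (l.foldl (pvAStep m) d) := by
  induction l generalizing d with
  | nil => simp
  | cons q rest ih =>
      simp only [List.foldl_cons, PySem.Dict.getD_insert_self, PySem.Dict.insert_insert_self]
      exact ih (pvAStep m d q)

-- A's outer loop over fresh, pairwise-distinct tags appends one item per tag
theorem pv_outer (m : Int) (t : List (String × List (String × Int)))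
    (res : PySem.Dict String (PySem.Dict String Int))
    (hnd : (t.map Prod.fst).Nodup) (hfresh : ∀ p ∈ t, res.contains p.1 = false) :
    (t.foldl
      (fun res p =>
        let res1 := if res.contains p.1 then res else res.insert p.1 PySem.Dict.empty
        p.2.foldl (fun r q => r.insert p.1 (pvAStep m (r.getD p.1 PySem.Dict.empty) q)) res1)
      res).items
      = res.items ++ t.map (fun p => (p.1, p.2.foldl (pvAStep m) PySem.Dict.empty)) := by
  induction t generalizing res with
  | nil => simp
  | cons p rest ih =>
      simp only [List.map_cons, List.nodup_cons, List.mem_map] at hnd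
      have hp : res.contains p.1 = false := hfresh p (by simp)
      simp only [List.foldl_cons, hp, if_neg (by simp : ¬ (false = true)), pv_inner_hoist m p.2 res p.1]
      rw [ih (res.insert p.1 (p.2.foldl (pvAStep m) PySem.Dict.empty)) hnd.2 ?_ ]
      · rw [PySem.Dict.items_insert_of_not_contains _ _ hp]
        simp
      · intro p' hp'
        rw [PySem.Dict.contains_insert]
        have hne : (p'.1 == p.1) = false := by
          simp only [beq_eq_false_iff_ne, ne_eq]
          intro h
          exact hnd.1 ⟨p', hp', h⟩
        simp [hne, hfresh p' (List.mem_cons_of_mem _ hp')]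

-- value of the inner fold at any key: old value plus the sum of matching counts
theorem pv_inner_getD (m : Int) (l : List (String × Int)) (d : PySem.Dict String Int) (k : String) :
    (l.foldl (fun d q => d.insert (pvKey m q) (d.getD (pvKey m q) 0 + q.2)) d).getD k 0
      = d.getD k 0 + ((l.filter (fun q => pvKey m q == k)).map (fun q => q.2)).sum := by
  induction l generalizing d with
  | nil => simp
  | cons q rest ih =>
      simp only [List.foldl_cons, ih, List.filter_cons]
      by_cases h : pvKey m q = k
      · simp [h]
        ring
      · simp [h, PySem.Dict.getD_insert]
        exact fun h' => absurd h'.symm h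

-- A's folded inner dict, as items, is exactly B's group-by for that tag
theorem pv_inner_items (m : Int) (l : List (String × Int)) :
    (l.foldl (pvAStep m) PySem.Dict.empty).items
      = (PySem.List.dedup ((l.map (fun q => ((if q.2 < m then "_RARE_" else q.1), q.2))).map (fun q => q.1))).map
          (fun k => (k, (((l.map (fun q => ((if q.2 < m then "_RARE_" else q.1), q.2))).filter (fun q => q.1 == k)).map (fun q => q.2)).sum)) := by
  rw [pvAStep_funext]
  have hmap : (l.map (fun q => ((if q.2 < m then "_RARE_" else q.1), q.2))).map (fun q => q.1) = l.map (pvKey m) := by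
    simp [List.map_map, pvKey, Function.comp_def]
  have hkeys : (l.foldl (fun d q => d.insert (pvKey m q) (d.getD (pvKey m q) 0 + q.2)) (PySem.Dict.empty : PySem.Dict String Int)).keys
      = PySem.List.dedup (l.map (pvKey m)) := by
    rw [PySem.Dict.keys_foldl_insert_key]
    simp [PySem.Set.update_nil_left, PySem.List.dedup_eq_ofList]
  have hnd : (l.foldl (fun d q => d.insert (pvKey m q) (d.getD (pvKey m q) 0 + q.2)) (PySem.Dict.empty : PySem.Dict String Int)).keys.Nodup := by
    exact PySem.Dict.nodup_keys_foldl_insert_key _ _ _ _ PySem.Dict.nodup_keys_empty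
  rw [PySem.Dict.items_eq_map_keys _ hnd 0, hkeys, hmap]
  apply List.map_congr_left
  intro k _
  rw [pv_inner_getD]
  have hfil : (l.map (fun q => ((if q.2 < m then "_RARE_" else q.1), q.2))).filter (fun q => q.1 == k)
      = (l.filter (fun q => pvKey m q == k)).map (fun q => (pvKey m q, q.2)) := by
    rw [List.filter_map]
    simp [pvKey, Function.comp_def]
  simp [hfil, List.map_map, Function.comp_def]

-- ===== VERDICT (by name: the statement is the Claim_ definition above) =====
theorem addRARE_to_TagToWordToCount_spec : Claim_equal_addRARE_to_TagToWordToCount := by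
  intro t m _ hpre
  unfold Spec_addRARE_to_TagToWordToCount addRARE_to_TagToWordToCount addRARE_to_TagToWordToCount_alt
  rw [pv_outer m t PySem.Dict.empty hpre (by intro p _; exact PySem.Dict.contains_empty _)]
  rw [show (PySem.Dict.empty : PySem.Dict String (PySem.Dict String Int)).items = [] from rfl]
  rw [List.nil_append, List.map_map]
  apply List.map_congr_left
  intro p _
  simp only [Function.comp_def]
  exact congrArg (fun x => (p.1, x)) (pv_inner_items m p.2)
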